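-- pv_equiv track=rewrite | github.com/fxxce/Symmetric-Encryption | AES/AES.py | key_and_text_to_matrix
-- ===== SOURCE A (Python) =====
-- def key_and_text_to_matrix(key_string):
--     arr = [["00" for _ in range(4)] for _ in range(4)]
--     row = 0
--     col = 0
--     for i in range(0, len(key_string), 2):
--         if row < 4 and col < 4:
--             if len(key_string[i:i + 2]) == 1:
--                 arr[row][col] = key_string[i:i + 2] + "0"
--             else:
--                 arr[row][col] = key_string[i:i + 2]
--             col = col + 1
--             if col > 3:
--                 row = row + 1
--                 col = 0
--     return arr
-- ===== SOURCE B (Python) =====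
-- def _flat(s, k):
--     # collect padded 2-char chunks, at most k of them
--     if k == 0 or not s:
--         return []
--     if len(s) == 1:
--         return [s + "0"]
--     return [s[:2]] + _flat(s[2:], k - 1)
--
--
-- def key_and_text_to_matrix(key_string):
--     flat = _flat(key_string, 16)
--     flat = flat + ["00"] * (16 - len(flat))
--     return [flat[r * 4:(r + 1) * 4] for r in range(4)]
-- ===== Notes on version B (the rewrite author's own statement) =====
-- stated objective: simpler
-- what changed: B builds a flat list of padded 2-char chunks (capped at 16, then padded with "00" to 16 entries) and reshapes it into 4 rows of 4, instead of A's in-place 4x4 matrix fill driven by running row/col counters.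
import Mathlib
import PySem

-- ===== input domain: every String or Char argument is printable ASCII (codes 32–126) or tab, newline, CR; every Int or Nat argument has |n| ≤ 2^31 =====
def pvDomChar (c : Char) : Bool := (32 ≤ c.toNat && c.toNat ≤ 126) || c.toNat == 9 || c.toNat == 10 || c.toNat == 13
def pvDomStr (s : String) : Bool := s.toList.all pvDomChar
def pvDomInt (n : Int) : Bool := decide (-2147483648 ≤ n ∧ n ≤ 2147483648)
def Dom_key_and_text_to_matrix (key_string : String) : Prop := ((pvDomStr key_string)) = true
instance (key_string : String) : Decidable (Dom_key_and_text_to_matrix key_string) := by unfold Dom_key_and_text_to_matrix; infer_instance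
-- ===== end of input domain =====

-- B replaces A's in-place matrix fill with row/col counters by a flatten-then-reshape
-- decomposition (padded chunk list capped at 16, then grouped into 4 rows); objective: simpler.

-- ===== PORT A =====
-- chunk padding: 'if len(chunk) == 1: chunk + "0" else chunk' (string concat ported as
-- list append + String.ofList, exact on code points)
def pvPad (chunk : List Char) : String :=
  if chunk.length = 1 then String.ofList (chunk ++ ['0']) else String.ofList chunk

-- loop body of A: guarded placement at arr[row][col], then advance col/row
def pvPlace (st : List (List String) × Nat × Nat) (chunk : List Char) :
    List (List String) × Nat × Nat :=
  match st with
  | (arr, row, col) =>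
    if row < 4 ∧ col < 4 then
      let arr' := arr.set row ((arr.getD row []).set col (pvPad chunk))
      let col' := col + 1
      if col' > 3 then (arr', row + 1, 0) else (arr', row, col')
    else (arr, row, col)

def key_and_text_to_matrix (key_string : String) : List (List String) :=
  let arr := List.replicate 4 (List.replicate 4 "00")
  ((PySem.List.pyRange 0 (key_string.toList.length : Int) 2).foldl
      (fun st i => pvPlace st (PySem.List.slice key_string.toList (some i) (some (i + 2))))
      (arr, 0, 0)).1

-- ===== PORT B =====
-- _flat(s, k): padded 2-char chunks of s, at most k of them
def pvFlat : List Char → Nat → List String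
  | _, 0 => []
  | [], _ => []
  | [a], _ + 1 => [String.ofList [a, '0']]
  | a :: b :: rest, k + 1 => String.ofList [a, b] :: pvFlat rest k

def key_and_text_to_matrix_alt (key_string : String) : List (List String) :=
  let flat := pvFlat key_string.toList 16
  let flat2 := flat ++ List.replicate (16 - flat.length) "00"
  (List.range 4).map (fun r => (flat2.drop (r * 4)).take 4)

-- ===== PRECONDITION & SPEC =====
def Spec_key_and_text_to_matrix (key_string : String) (out : List (List String)) : Prop := out = key_and_text_to_matrix_alt key_string
instance (key_string : String) (out : List (List String)) : Decidable (Spec_key_and_text_to_matrix key_string out) := by unfold Spec_key_and_text_to_matrix; infer_instance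

-- ===== CLAIM (what is proved, stated in full; the proofs are below) =====
def Claim_equal_key_and_text_to_matrix : Prop := ∀ (key_string : String), Dom_key_and_text_to_matrix key_string → Spec_key_and_text_to_matrix key_string (key_and_text_to_matrix key_string)

-- ===== LEMMAS AND PROOFS =====

-- the unpadded 2-char chunks of a string
def pvChunks : List Char → List (List Char)
  | [] => []
  | [a] => [[a]]
  | a :: b :: rest => [a, b] :: pvChunks rest

-- B's reshape of a flat list (with "00" padding to 16 cells) into 4 rows of 4
def pvMatOf (flat : List String) : List (List String) :=
  (List.range 4).map (fun r => ((flat ++ List.replicate (16 - flat.length) "00").drop (r * 4)).take 4)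

lemma pvFlat_eq_take (cs : List Char) (k : Nat) :
    pvFlat cs k = ((pvChunks cs).map pvPad).take k := by
  induction cs using pvChunks.induct generalizing k with
  | case1 => cases k <;> simp [pvFlat, pvChunks]
  | case2 a => cases k <;> simp [pvFlat, pvChunks, pvPad]
  | case3 a b rest ih =>
      cases k with
      | zero => simp [pvFlat]
      | succ k => simp [pvFlat, pvChunks, pvPad, ih]

-- step-2 range unrolls one element at a time
lemma pvRange_two_cons (i n : Int) (h : i < n) :
    PySem.List.pyRange i n 2 = i :: PySem.List.pyRange (i + 2) n 2 := by
  rw [PySem.List.pyRange_of_pos i n (by norm_num),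
      PySem.List.pyRange_of_pos (i + 2) n (by norm_num)]
  have hc : (if i < n then ((n - i + 2 - 1) / 2).toNat else 0)
      = (if i + 2 < n then ((n - (i + 2) + 2 - 1) / 2).toNat else 0) + 1 := by
    split <;> split <;> omega
  rw [hc, List.range_succ_eq_map]
  simp [List.map_map, Function.comp_def]
  intro k _
  ring

-- A's fold over the index range is the fold over the chunk list
lemma pvFold_eq_chunks (cs ds : List Char) (i : Nat) (hds : cs.drop i = ds) (st : List (List String) × Nat × Nat) :
    (PySem.List.pyRange (i : Int) (cs.length : Int) 2).foldl
        (fun st j => pvPlace st (PySem.List.slice cs (some j) (some (j + 2)))) st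
      = (pvChunks ds).foldl pvPlace st := by
  induction ds using pvChunks.induct generalizing i st with
  | case1 =>
      have hi : cs.length ≤ i := by
        have := congrArg List.length hds; simp at this; omega
      rw [PySem.List.pyRange_of_pos _ _ (by norm_num)]
      simp [pvChunks, show ¬ ((i : Int) < (cs.length : Int)) by exact_mod_cast not_lt.2 hi]
  | case2 a =>
      have hlen : cs.length = i + 1 := by
        have := congrArg List.length hds; simp at this; omega
      rw [pvRange_two_cons _ _ (by exact_mod_cast by omega)]
      have h2 : PySem.List.pyRange ((i : Int) + 2) (cs.length : Int) 2 = [] := by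
        rw [PySem.List.pyRange_of_pos _ _ (by norm_num)]
        simp; omega
      rw [List.foldl_cons, h2]
      have hs : PySem.List.slice cs (some (i : Int)) (some ((i : Int) + 2)) = [a] := by
        have := PySem.List.slice_natCast_add cs i 2
        push_cast at this ⊢; rw [this, hds]; rfl
      simp [pvChunks, hs]
  | case3 a b rest ih =>
      have hlen : cs.length = i + 2 + rest.length := by
        have := congrArg List.length hds; simp at this; omega
      rw [pvRange_two_cons _ _ (by exact_mod_cast by omega)]
      rw [List.foldl_cons]
      have hs : PySem.List.slice cs (some (i : Int)) (some ((i : Int) + 2)) = [a, b] := by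
        have := PySem.List.slice_natCast_add cs i 2
        push_cast at this ⊢; rw [this, hds]; rfl
      have hdrop : cs.drop (i + 2) = rest := by
        simpa [List.drop_drop, Nat.add_comm] using congrArg (List.drop 2) hds
      have := ih (i + 2) hdrop (pvPlace st [a, b])
      push_cast at this
      rw [hs, this]
      simp [pvChunks]

-- a 4-window of a set: untouched when j is outside the window
lemma pvWindow_ne (flat : List String) (v : String) (j a : Nat) (h : j < a ∨ a + 4 ≤ j) :
    ((flat.set j v).drop a).take 4 = (flat.drop a).take 4 := by
  apply List.ext_getElem
  · simp
  · intro c h1 h2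
    simp only [List.length_take, List.length_drop, List.length_set] at h1 h2
    simp only [List.getElem_take, List.getElem_drop, List.getElem_set]
    rw [if_neg (by omega)]

-- a 4-window of a set: set inside the window
lemma pvWindow_eq (flat : List String) (v : String) (j a : Nat)
    (h1 : a ≤ j) (h2 : j < a + 4) :
    ((flat.set j v).drop a).take 4 = ((flat.drop a).take 4).set (j - a) v := by
  apply List.ext_getElem
  · simp
  · intro c hc1 hc2
    simp only [List.length_take, List.length_drop, List.length_set] at hc1 hc2
    simp only [List.getElem_take, List.getElem_drop, List.getElem_set]
    split <;> split <;> first | rfl | omega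

-- padded flat list of done ++ [v] is the padded flat list of done with cell j set
lemma pvPadded_snoc (done : List String) (v : String) (h : done.length < 16) :
    (done ++ [v]) ++ List.replicate (16 - (done ++ [v]).length) "00"
      = (done ++ List.replicate (16 - done.length) "00").set done.length v := by
  have h16 : 16 - done.length = (16 - (done.length + 1)) + 1 := by omega
  rw [List.set_append, if_neg (by omega)]
  simp [h16, List.replicate_succ]

-- placing v at cell j of the reshaped matrix = reshaping with cell j set
lemma pvMatOf_snoc (done : List String) (v : String) (h : done.length < 16) :
    (pvMatOf done).set (done.length / 4)
        (((pvMatOf done).getD (done.length / 4) []).set (done.length % 4) v)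
      = pvMatOf (done ++ [v]) := by
  set j := done.length with hj
  have hj4 : j / 4 < 4 := by omega
  have hflen : (done ++ List.replicate (16 - done.length) "00").length = 16 := by
    simp; omega
  apply List.ext_getElem
  · simp [pvMatOf]
  · intro r hr1 hr2
    simp only [pvMatOf, List.length_set, List.length_map, List.length_range] at hr1
    simp only [pvMatOf, List.getElem_set, List.getElem_map, List.getElem_range]
    rw [pvPadded_snoc done v h]
    have hget : (List.map
          (fun r => ((done ++ List.replicate (16 - done.length) "00").drop (r * 4)).take 4)
          (List.range 4)).getD (j / 4) []
        = ((done ++ List.replicate (16 - done.length) "00").drop (j / 4 * 4)).take 4 := by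
      rw [List.getD_eq_getElem?_getD]
      simp [hj4]
    by_cases hcase : j / 4 = r
    · subst hcase
      rw [if_pos rfl, hget,
          pvWindow_eq _ _ _ _ (by omega) (by omega)]
      congr 1
      omega
    · rw [if_neg hcase, pvWindow_ne _ _ _ _ (by omega)]

-- main loop invariant: folding chunks over A's placement = B's reshape of the flat list
lemma pvInv (chs : List (List Char)) (done : List String) (h : done.length ≤ 16) :
    chs.foldl pvPlace (pvMatOf done, done.length / 4, done.length % 4)
      = (pvMatOf (done ++ (chs.map pvPad).take (16 - done.length)),
         min 16 (done.length + chs.length) / 4, min 16 (done.length + chs.length) % 4) := by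
  induction chs generalizing done with
  | nil => simp [Nat.min_eq_right h]
  | cons c rest ih =>
      rw [List.foldl_cons]
      by_cases h16 : done.length = 16
      · have hstep : pvPlace (pvMatOf done, done.length / 4, done.length % 4) c
            = (pvMatOf done, done.length / 4, done.length % 4) := by
          rw [pvPlace, if_neg (by omega)]
        rw [hstep, ih done h]
        simp [h16]
      · have hlt : done.length < 16 := by omega
        have hstep : pvPlace (pvMatOf done, done.length / 4, done.length % 4) c
            = (pvMatOf (done ++ [pvPad c]), (done.length + 1) / 4, (done.length + 1) % 4) := by
          rw [pvPlace, if_pos ⟨by omega, by omega⟩]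
          rw [pvMatOf_snoc done (pvPad c) hlt]
          by_cases hcol : done.length % 4 + 1 > 3
          · rw [if_pos hcol]
            simp only [Prod.mk.injEq]
            refine ⟨trivial, ?_, ?_⟩ <;> omega
          · rw [if_neg hcol]
            simp only [Prod.mk.injEq]
            refine ⟨trivial, ?_, ?_⟩ <;> omega
        rw [hstep]
        have hih := ih (done ++ [pvPad c]) (by simp; omega)
        simp only [List.length_append, List.length_singleton] at hih
        rw [hih]
        have htake : (done ++ [pvPad c]) ++ (rest.map pvPad).take (16 - (done.length + 1))
            = done ++ ((c :: rest).map pvPad).take (16 - done.length) := by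
          simp only [List.map_cons, List.append_assoc]
          congr 1
          rw [show 16 - done.length = (16 - (done.length + 1)) + 1 by omega, List.take_succ_cons]
          rfl
        rw [htake]
        simp only [Prod.mk.injEq, List.length_cons]
        refine ⟨trivial, ?_, ?_⟩ <;> omega

lemma pvMatOf_nil : pvMatOf [] = List.replicate 4 (List.replicate 4 "00") := by decide

-- ===== VERDICT (by name: the statement is the Claim_ definition above) =====
theorem key_and_text_to_matrix_spec : Claim_equal_key_and_text_to_matrix := by
  intro key_string _
  unfold Spec_key_and_text_to_matrix key_and_text_to_matrix key_and_text_to_matrix_alt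
  dsimp only
  rw [show ((0 : Int)) = ((0 : Nat) : Int) by norm_num]
  rw [pvFold_eq_chunks key_string.toList key_string.toList 0 rfl, ← pvMatOf_nil]
  have := pvInv (pvChunks key_string.toList) [] (by simp)
  simp only [List.nil_append, List.length_nil, Nat.zero_div, Nat.zero_mod, Nat.zero_add] at this
  rw [this]
  rw [pvFlat_eq_take]
  rfl
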